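-- pv_equiv track=rewrite | github.com/hwbest403/Portfolio | Algorithm_Problems/Baekjoon/23kakao01.py | solution
-- ===== SOURCE A (Python) =====
-- from collections import defaultdict
--
-- def solution(friends, gifts):
--     answer = list(0 for _ in range(len(friends)))
--     nmap = defaultdict(int)
--     gift_info = list(list(0 for _ in range(len(friends))) for _ in range(len(friends)))
--     gift_idx = list(0 for _ in range(len(friends)))
--     for idx, f in enumerate(friends):
--         nmap[f] = idx
--     for g in gifts:
--         tmp = list(g.split())
--         gift_info[nmap[tmp[0]]][nmap[tmp[1]]] += 1
--     for i in range(len(friends)):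
--         give = sum(gift_info[i])
--         take = 0
--         for j in range(len(friends)):
--             take += gift_info[j][i]
--         gift_idx[i] = give-take
--     for i in range(len(friends)):
--         for j in range(i+1, len(friends)):
--             if gift_info[i][j] > gift_info[j][i]:
--                 answer[i] += 1
--             elif gift_info[i][j] < gift_info[j][i]:
--                 answer[j] += 1
--             else:
--                 if gift_idx[i] > gift_idx[j]:
--                     answer[i] += 1
--                 elif gift_idx[i] < gift_idx[j]:
--                     answer[j] += 1
--                 else:
--                     pass
--     return max(answer)
-- ===== SOURCE B (Python) =====
-- def solution(friends, gifts):
--     n = len(friends)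
--     nmap = {f: i for i, f in enumerate(friends)}
--     # one pass over gifts: pair counts in a dict, net gift index directly
--     cnt = {}
--     net = [0] * n
--     for g in gifts:
--         t = g.split()
--         a = nmap.get(t[0], 0)
--         b = nmap.get(t[1], 0)
--         cnt[(a, b)] = cnt.get((a, b), 0) + 1
--         net[a] += 1
--         net[b] -= 1
--     # baseline score by net alone: score[i] = #{j : net[j] < net[i]},
--     # read off a sorted copy (rank of first occurrence = count of smaller values)
--     rank = {}
--     for pos, v in enumerate(sorted(net)):
--         if v not in rank:
--             rank[v] = pos
--     score = [rank[v] for v in net]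
--     # sparse correction: only exchanged pairs with a strict head-to-head winner deviate
--     # from the net-only outcome; each such pair qualifies from exactly one key direction
--     for (a, b), c in cnt.items():
--         if a != b and c > cnt.get((b, a), 0):
--             score[a] += 1 - (net[a] > net[b])
--             score[b] -= net[b] > net[a]
--     return max(score)
-- ===== Notes on version B (the rewrite author's own statement) =====
-- stated objective: alternative
-- what changed: Instead of A's dense NxN matrix, full give/take re-scan and triangular pairwise comparison loop, B computes each friend's baseline score as the rank of its net gift index in a sorted copy (count of strictly smaller nets) and applies sparse corrections only for exchanged pairs with a strict head-to-head winner, read from a pair-keyed dict built in one pass over gifts.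
import Mathlib
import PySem

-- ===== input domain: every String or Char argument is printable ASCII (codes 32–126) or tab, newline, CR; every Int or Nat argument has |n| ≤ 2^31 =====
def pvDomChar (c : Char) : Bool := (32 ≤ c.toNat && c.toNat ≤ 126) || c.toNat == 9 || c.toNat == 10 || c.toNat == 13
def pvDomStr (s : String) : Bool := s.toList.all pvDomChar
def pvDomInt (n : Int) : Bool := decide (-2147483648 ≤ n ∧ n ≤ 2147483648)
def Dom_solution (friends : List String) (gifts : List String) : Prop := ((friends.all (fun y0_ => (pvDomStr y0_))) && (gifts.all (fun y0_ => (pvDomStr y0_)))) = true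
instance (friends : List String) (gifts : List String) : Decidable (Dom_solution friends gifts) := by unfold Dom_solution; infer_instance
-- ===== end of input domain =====

-- B replaces A's dense N×N matrix, its full give/take re-scan and its triangular pairwise
-- comparison loop by a different algorithm: each friend's baseline score is the rank of its
-- net gift index in a sorted copy (count of strictly smaller nets), corrected only for the
-- exchanged pairs with a strict head-to-head winner, read from a pair-keyed gift-count dict;
-- objective: alternative.

-- ===== PORT A =====
-- shared helper: 'for idx, f in enumerate(friends): nmap[f] = idx' (A) = '{f: i for i, f in enumerate(friends)}' (B)
def pvNmap (friends : List String) : PySem.Dict String Int :=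
  (PySem.List.enumerate friends 0).foldl (fun d p => d.insert p.2 p.1) PySem.Dict.empty

-- shared helper: 'tmp = g.split(); … tmp[0] … tmp[1] …' (identical in both Pythons);
-- none = IndexError on fewer than two tokens, excluded by Pre_
def pvSplitTwo (g : String) : Option (String × String) :=
  let tmp := PySem.Str.split₀ g
  match PySem.List.pyGet? tmp 0, PySem.List.pyGet? tmp 1 with
  | some a, some b => some (a, b)
  | _, _ => none

-- 'gift_info[nmap[tmp[0]]][nmap[tmp[1]]] += 1'; nmap values are enumerate indices or the
-- defaultdict default 0, hence ≥ 0, so .toNat is exact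
def pvStepA (nmap : PySem.Dict String Int) (m : List (List Int)) (g : String) : List (List Int) :=
  match pvSplitTwo g with
  | some (s, t) =>
      let a := (nmap.getD s 0).toNat
      let b := (nmap.getD t 0).toNat
      m.set a ((m.getD a []).set b ((m.getD a []).getD b 0 + 1))
  | none => m

-- body of A's pair loop for a fixed pair (i, j)
def pvInnerA (gInfo : List (List Int)) (gIdx : List Int) (i : Nat) (ans : List Int) (j : Nat) :
    List Int :=
  if (gInfo.getD i []).getD j 0 > (gInfo.getD j []).getD i 0 then ans.set i (ans.getD i 0 + 1)
  else if (gInfo.getD i []).getD j 0 < (gInfo.getD j []).getD i 0 then ans.set j (ans.getD j 0 + 1)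
  else if gIdx.getD i 0 > gIdx.getD j 0 then ans.set i (ans.getD i 0 + 1)
  else if gIdx.getD i 0 < gIdx.getD j 0 then ans.set j (ans.getD j 0 + 1)
  else ans

def solution (friends : List String) (gifts : List String) : Int :=
  let n := friends.length
  let nmap := pvNmap friends
  let giftInfo := gifts.foldl (pvStepA nmap) (List.replicate n (List.replicate n 0))
  let giftIdx : List Int := (List.range n).map (fun i =>
    (giftInfo.getD i []).sum
      - (List.range n).foldl (fun t j => t + (giftInfo.getD j []).getD i 0) 0)
  let answer := (List.range n).foldl (fun ans i =>
    (List.range' (i + 1) (n - (i + 1))).foldl (pvInnerA giftInfo giftIdx i) ans)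
    (List.replicate n 0)
  (PySem.List.max? answer (fun x => x)).getD 0

-- ===== PORT B =====
-- one pass over gifts: 'cnt[(a,b)] += 1; net[a] += 1; net[b] -= 1' (nmap values ≥ 0, .toNat exact)
def pvStepB (nmap : PySem.Dict String Int) (st : PySem.Dict (Int × Int) Int × List Int)
    (g : String) : PySem.Dict (Int × Int) Int × List Int :=
  match pvSplitTwo g with
  | some (s, t) =>
      let a := nmap.getD s 0
      let b := nmap.getD t 0
      let cnt := st.1.insert (a, b) (st.1.getD (a, b) 0 + 1)
      let net := st.2.set a.toNat (st.2.getD a.toNat 0 + 1)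
      (cnt, net.set b.toNat (net.getD b.toNat 0 - 1))
  | none => st

-- 'for pos, v in enumerate(sorted(net)): if v not in rank: rank[v] = pos'
def pvRank (net : List Int) : PySem.Dict Int Int :=
  (PySem.List.enumerate (PySem.List.sorted net (fun x => x) false) 0).foldl
    (fun d p => if d.contains p.2 then d else d.insert p.2 p.1) PySem.Dict.empty

-- body of B's correction loop: 'if a != b and c > cnt.get((b, a), 0): score[a] += …; score[b] -= …'
-- (a, b are nmap values, hence ≥ 0: .toNat is exact; Python's int(bool) arithmetic spelled out)
def pvQualStep (cnt : PySem.Dict (Int × Int) Int) (net : List Int) (sc : List Int)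
    (p : (Int × Int) × Int) : List Int :=
  if p.1.1 ≠ p.1.2 ∧ cnt.getD (p.1.2, p.1.1) 0 < p.2 then
    let a := p.1.1.toNat
    let b := p.1.2.toNat
    let sc1 := sc.set a (sc.getD a 0 + (1 - (if net.getD b 0 < net.getD a 0 then 1 else 0)))
    sc1.set b (sc1.getD b 0 - (if net.getD a 0 < net.getD b 0 then 1 else 0))
  else sc

def solution_alt (friends : List String) (gifts : List String) : Int :=
  let n := friends.length
  let nmap := pvNmap friends
  let st := gifts.foldl (pvStepB nmap) (PySem.Dict.empty, List.replicate n 0)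
  let rank := pvRank st.2
  -- 'score = [rank[v] for v in net]': every v is in rank (v ∈ net ⊆ sorted(net)), so the
  -- getD default is never used and the port is exact
  let score0 := st.2.map (fun v => rank.getD v 0)
  let score := st.1.items.foldl (pvQualStep st.1 st.2) score0
  (PySem.List.max? score (fun x => x)).getD 0

-- ===== PRECONDITION & SPEC =====
-- Pre_ excludes exactly where the Python A raises: max() on an empty answer list (no friends)
-- and tmp[1] / tmp[0] IndexError when a gift line has fewer than two whitespace-separated tokens.
def Pre_solution (friends : List String) (gifts : List String) : Prop :=
  friends ≠ [] ∧ ∀ g ∈ gifts, 2 ≤ (PySem.Str.split₀ g).length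
instance (friends : List String) (gifts : List String) : Decidable (Pre_solution friends gifts) := by
  unfold Pre_solution; infer_instance

def pvWitness_solution : List String × List String := (["a", "b"], ["a b", "b a", "a b"])

def Spec_solution (friends : List String) (gifts : List String) (out : Int) : Prop :=
  out = solution_alt friends gifts
instance (friends : List String) (gifts : List String) (out : Int) :
    Decidable (Spec_solution friends gifts out) := by unfold Spec_solution; infer_instance

-- ===== CLAIM (what is proved, stated in full; the proofs are below) =====
def Claim_equal_solution : Prop := ∀ (friends : List String) (gifts : List String),
  Dom_solution friends gifts → Pre_solution friends gifts →
  Spec_solution friends gifts (solution friends gifts)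

-- ===== LEMMAS AND PROOFS =====

-- matrix entry
def pvE (m : List (List Int)) (i j : Nat) : Int := (m.getD i []).getD j 0

-- bump answer[k] += 1
def pvBump (ans : List Int) (k : Nat) : List Int := ans.set k (ans.getD k 0 + 1)

-- canonical "bump the winner" pair step A's final loops are reduced to
def pvBStep (b : Nat → Nat → Bool) (i : Nat) (a : List Int) (j : Nat) : List Int :=
  if b j i then pvBump (if b i j then pvBump a i else a) j
  else (if b i j then pvBump a i else a)

-- 0/1 indicator of 'net[j] < net[i]'
def pvB (net : List Int) (i j : Nat) : Int := if net.getD j 0 < net.getD i 0 then 1 else 0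

-- per-item contribution of B's correction loop to score[i]
def pvContrib (cnt : PySem.Dict (Int × Int) Int) (net : List Int) (i : Nat)
    (p : (Int × Int) × Int) : Int :=
  if p.1.1 ≠ p.1.2 ∧ cnt.getD (p.1.2, p.1.1) 0 < p.2 then
    (if p.1.1 = (i : Int) then 1 - pvB net i p.1.2.toNat else 0)
    + (if p.1.2 = (i : Int) then -(pvB net i p.1.1.toNat) else 0)
  else 0

-- per-pair deviation of the true outcome from the net-only outcome
def pvDelta (cnt : PySem.Dict (Int × Int) Int) (net : List Int) (i j : Nat) : Int :=
  (if cnt.getD ((j : Int), (i : Int)) 0 < cnt.getD ((i : Int), (j : Int)) 0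
     then 1 - pvB net i j else 0)
  + (if cnt.getD ((i : Int), (j : Int)) 0 < cnt.getD ((j : Int), (i : Int)) 0
     then -(pvB net i j) else 0)

-- the invariant tying A's matrix to B's (cnt, net) state
def pvR (n : Nat) (m : List (List Int)) (cnt : PySem.Dict (Int × Int) Int) (net : List Int) :
    Prop :=
  m.length = n ∧ (∀ i, i < n → (m.getD i []).length = n) ∧ net.length = n ∧
  (∀ i j, i < n → j < n → pvE m i j = cnt.getD ((i : Int), (j : Int)) 0) ∧
  (∀ i, i < n → net.getD i 0 =
    (∑ j ∈ Finset.range n, pvE m i j) - (∑ j ∈ Finset.range n, pvE m j i)) ∧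
  cnt.keys.Nodup ∧
  (∀ p ∈ cnt.items, 0 ≤ p.1.1 ∧ p.1.1 < (n : Int) ∧ 0 ≤ p.1.2 ∧ p.1.2 < (n : Int)) ∧
  (∀ k, 0 ≤ cnt.getD k 0)

theorem pv_getD_set {α : Type} (l : List α) (k : Nat) (v : α) (i : Nat) (d : α) :
    (l.set k v).getD i d = if i = k ∧ k < l.length then v else l.getD i d := by
  rw [List.getD_eq_getElem?_getD, List.getD_eq_getElem?_getD, List.getElem?_set]
  by_cases h1 : i = k
  · subst h1
    by_cases h2 : i < l.length
    · simp [h2]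
    · simp only [h2, and_false, if_false, if_true]
      rw [List.getElem?_eq_none (by omega)]
  · have h1' : ¬ (k = i) := fun h => h1 h.symm
    simp [h1, h1']

theorem pv_bump_getD (a : List Int) (k : Nat) (hk : k < a.length) (kk : Nat) :
    (pvBump a k).getD kk 0 = a.getD kk 0 + if kk = k then 1 else 0 := by
  unfold pvBump
  rw [pv_getD_set]
  by_cases h : kk = k
  · subst h; simp [hk]
  · simp [h]

theorem pv_bump_length (a : List Int) (k : Nat) : (pvBump a k).length = a.length := by
  simp [pvBump]

theorem pv_enumerate_bound {α : Type} (l : List α) (s : Int) (p : Int × α)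
    (h : p ∈ PySem.List.enumerate l s) : s ≤ p.1 ∧ p.1 < s + l.length := by
  induction l generalizing s with
  | nil => simp [PySem.List.enumerate] at h
  | cons x t ih =>
    simp only [PySem.List.enumerate, List.mem_cons] at h
    rcases h with rfl | h
    · simp only [List.length_cons]; push_cast; omega
    · have := ih (s + 1) h
      simp only [List.length_cons]; push_cast; omega

theorem pv_foldl_insert_bound (N : Int) (l : List (Int × String)) :
    ∀ (d : PySem.Dict String Int), (∀ p ∈ l, 0 ≤ p.1 ∧ p.1 < N) →
    (∀ s, 0 ≤ d.getD s 0 ∧ d.getD s 0 < N) →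
    ∀ s, 0 ≤ (l.foldl (fun d p => d.insert p.2 p.1) d).getD s 0 ∧
         (l.foldl (fun d p => d.insert p.2 p.1) d).getD s 0 < N := by
  induction l with
  | nil => intro d _ hd s; simpa using hd s
  | cons p t ih =>
    intro d hl hd s
    refine ih _ (fun q hq => hl q (List.mem_cons_of_mem _ hq)) ?_ s
    intro s'
    rw [PySem.Dict.getD_insert]
    split_ifs with h
    · exact hl p List.mem_cons_self
    · exact hd s'

theorem pv_nmap_bound (friends : List String) (h : friends ≠ []) (s : String) :
    0 ≤ (pvNmap friends).getD s 0 ∧ (pvNmap friends).getD s 0 < (friends.length : Int) := by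
  have hn : 0 < friends.length := List.length_pos_of_ne_nil h
  unfold pvNmap
  refine pv_foldl_insert_bound (friends.length : Int) _ _ ?_ ?_ s
  · intro p hp
    have := pv_enumerate_bound friends 0 p hp
    omega
  · intro s'
    simp [PySem.Dict.getD_empty]
    omega

theorem pv_step_inv (n : Nat) (nmap : PySem.Dict String Int)
    (hnm : ∀ s, 0 ≤ nmap.getD s 0 ∧ nmap.getD s 0 < (n : Int))
    (m : List (List Int)) (cnt : PySem.Dict (Int × Int) Int) (net : List Int)
    (hR : pvR n m cnt net) (g : String) :
    pvR n (pvStepA nmap m g) (pvStepB nmap (cnt, net) g).1 (pvStepB nmap (cnt, net) g).2 := by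
  obtain ⟨hlen, hrow, hnet, hcnt, hsum, hnd, hitems, hpos⟩ := hR
  unfold pvStepA pvStepB
  cases hsp : pvSplitTwo g with
  | none => exact ⟨hlen, hrow, hnet, hcnt, hsum, hnd, hitems, hpos⟩
  | some st =>
    obtain ⟨s, t⟩ := st
    simp only
    obtain ⟨ha0, haN⟩ := hnm s
    obtain ⟨hb0, hbN⟩ := hnm t
    set ai := nmap.getD s 0 with hai
    set bi := nmap.getD t 0 with hbi
    set a := ai.toNat with ha
    set b := bi.toNat with hb
    have haeq : (a : Int) = ai := Int.toNat_of_nonneg ha0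
    have hbeq : (b : Int) = bi := Int.toNat_of_nonneg hb0
    have han : a < n := by omega
    have hbn : b < n := by omega
    set row := m.getD a []
    set m' := m.set a (row.set b (row.getD b 0 + 1)) with hm'
    have hrowlen : row.length = n := hrow a han
    -- rows of m'
    have hgetrow : ∀ i : Nat, m'.getD i [] =
        if i = a then row.set b (row.getD b 0 + 1) else m.getD i [] := by
      intro i
      rw [hm', pv_getD_set]
      by_cases h : i = a
      · simp [h, hlen, han]
      · simp [h]
    have hE' : ∀ i j : Nat, pvE m' i j =
        if i = a ∧ j = b then pvE m a b + 1 else pvE m i j := by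
      intro i j
      unfold pvE
      rw [hgetrow i]
      by_cases h : i = a
      · subst h
        rw [if_pos rfl]
        simp only [true_and]
        rw [pv_getD_set]
        by_cases hj : j = b
        · subst hj; rw [if_pos ⟨rfl, by omega⟩, if_pos rfl]
        · rw [if_neg (by tauto), if_neg hj]
      · rw [if_neg h, if_neg (by tauto)]
    refine ⟨?_, ?_, ?_, ?_, ?_, ?_, ?_, ?_⟩
    · simpa [hm'] using hlen
    · intro i hi
      rw [hgetrow i]
      by_cases h : i = a
      · rw [if_pos h]; simp [hrowlen]
      · rw [if_neg h]; exact hrow i hi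
    · simp [List.length_set, hnet]
    · intro i j hi hj
      rw [hE' i j, PySem.Dict.getD_insert]
      have hpair : (((i : Nat) : Int), ((j : Nat) : Int)) = (ai, bi) ↔ i = a ∧ j = b := by
        constructor
        · intro h
          have h1 : (i : Int) = ai := congrArg Prod.fst h
          have h2 : (j : Int) = bi := congrArg Prod.snd h
          omega
        · rintro ⟨rfl, rfl⟩
          simp [haeq, hbeq]
      by_cases h : i = a ∧ j = b
      · rw [if_pos h, if_pos (hpair.2 h), hcnt a b han hbn, haeq, hbeq]
      · rw [if_neg h, if_neg (fun hh => h (hpair.1 hh)), hcnt i j hi hj]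
    · intro i hi
      -- new net value
      have hnet1len : (net.set a (net.getD a 0 + 1)).length = net.length := List.length_set ..
      have hv1 : ∀ k : Nat, (net.set a (net.getD a 0 + 1)).getD k 0 =
          net.getD k 0 + if k = a then 1 else 0 := by
        intro k
        rw [pv_getD_set]
        by_cases h : k = a
        · subst h; simp [hnet ▸ han, hnet, han]
        · simp [h]
      have hv2 : (((net.set a (net.getD a 0 + 1)).set b
            ((net.set a (net.getD a 0 + 1)).getD b 0 - 1))).getD i 0 =
          net.getD i 0 + (if i = a then 1 else 0) + (if i = b then -1 else 0) := by
        rw [pv_getD_set]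
        by_cases h : i = b
        · subst h
          rw [if_pos ⟨rfl, by simpa [hnet] using hbn⟩, hv1 b]
          split_ifs <;> omega
        · rw [if_neg (by tauto), hv1 i]
          simp [h]
      rw [hv2]
      -- sum deltas
      have hrs : ∀ i' : Nat, (∑ j ∈ Finset.range n, pvE m' i' j) =
          (∑ j ∈ Finset.range n, pvE m i' j) + (if i' = a then 1 else 0) := by
        intro i'
        have : ∀ j ∈ Finset.range n, pvE m' i' j =
            pvE m i' j + (if i' = a ∧ j = b then 1 else 0) := by
          intro j _
          rw [hE' i' j]
          split_ifs with h
          · obtain ⟨rfl, rfl⟩ := h; ring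
          · ring
        rw [Finset.sum_congr rfl this, Finset.sum_add_distrib]
        congr 1
        by_cases h : i' = a
        · subst h
          simp only [true_and]
          rw [Finset.sum_ite_eq' (Finset.range n) b (fun _ => (1 : Int))]
          simp [Finset.mem_range, hbn]
        · simp [h]
      have hcs : (∑ j ∈ Finset.range n, pvE m' j i) =
          (∑ j ∈ Finset.range n, pvE m j i) + (if i = b then 1 else 0) := by
        have : ∀ j ∈ Finset.range n, pvE m' j i =
            pvE m j i + (if i = b ∧ j = a then 1 else 0) := by
          intro j _
          rw [hE' j i]
          by_cases h : j = a ∧ i = b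
          · obtain ⟨rfl, rfl⟩ := h; simp
          · rw [if_neg h, if_neg (by tauto)]; ring
        rw [Finset.sum_congr rfl this, Finset.sum_add_distrib]
        congr 1
        by_cases h : i = b
        · subst h
          simp only [true_and]
          rw [Finset.sum_ite_eq' (Finset.range n) a (fun _ => (1 : Int))]
          simp [Finset.mem_range, han]
        · simp [h]
      rw [hrs i, hcs, hsum i hi]
      split_ifs <;> omega
    · exact PySem.Dict.nodup_keys_insert _ _ _ hnd
    · intro p hp
      rw [PySem.Dict.mem_items_insert] at hp
      rcases hp with rfl | ⟨hp, -⟩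
      · exact ⟨ha0, haN, hb0, hbN⟩
      · exact hitems p hp
    · intro k
      rw [PySem.Dict.getD_insert]
      split_ifs with h
      · have := hpos (ai, bi); omega
      · exact hpos k

theorem pv_fold_inv (n : Nat) (nmap : PySem.Dict String Int)
    (hnm : ∀ s, 0 ≤ nmap.getD s 0 ∧ nmap.getD s 0 < (n : Int)) (gifts : List String)
    (m : List (List Int)) (cnt : PySem.Dict (Int × Int) Int) (net : List Int)
    (hR : pvR n m cnt net) :
    pvR n (gifts.foldl (pvStepA nmap) m) (gifts.foldl (pvStepB nmap) (cnt, net)).1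
      (gifts.foldl (pvStepB nmap) (cnt, net)).2 := by
  induction gifts generalizing m cnt net with
  | nil => simpa using hR
  | cons g rest ih =>
    simp only [List.foldl_cons]
    have h1 := pv_step_inv n nmap hnm m cnt net hR g
    have h2 := ih (pvStepA nmap m g) (pvStepB nmap (cnt, net) g).1
      (pvStepB nmap (cnt, net) g).2 h1
    simpa using h2

theorem pv_sum_getD (l : List Int) :
    l.sum = ∑ j ∈ Finset.range l.length, l.getD j 0 := by
  induction l with
  | nil => simp
  | cons x t ih =>
    rw [List.sum_cons, List.length_cons, Finset.sum_range_succ']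
    simp [ih]
    ring

theorem pv_map_range_sum (n : Nat) (f : Nat → Int) :
    ((List.range n).map f).sum = ∑ j ∈ Finset.range n, f j := by
  induction n with
  | zero => simp
  | succ k ih => rw [List.range_succ, Finset.sum_range_succ]; simp [ih]

theorem pv_foldl_range_add (n : Nat) (f : Nat → Int) :
    (List.range n).foldl (fun t j => t + f j) 0 = ∑ j ∈ Finset.range n, f j := by
  rw [PySem.List.foldl_add, pv_map_range_sum]
  ring

theorem pv_innerA_bump (m : List (List Int)) (gIdx : List Int) (b : Nat → Nat → Bool)
    (hb : ∀ i j, b i j = (decide (pvE m j i < pvE m i j) ||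
      (decide (pvE m i j = pvE m j i) && decide (gIdx.getD j 0 < gIdx.getD i 0))))
    (i j : Nat) (ans : List Int) :
    pvInnerA m gIdx i ans j = pvBStep b i ans j := by
  have bfalse : ∀ (x y : Nat), ¬((m.getD y []).getD x 0 < (m.getD x []).getD y 0) →
      ((m.getD x []).getD y 0 = (m.getD y []).getD x 0 → ¬(gIdx.getD y 0 < gIdx.getD x 0)) →
      b x y = false := by
    intro x y h1 h2
    rw [hb x y]
    unfold pvE
    simp only [Bool.or_eq_false_iff, Bool.and_eq_false_iff, decide_eq_false_iff_not,
      decide_eq_true_eq]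
    refine ⟨h1, ?_⟩
    by_cases hq : (m.getD x []).getD y 0 = (m.getD y []).getD x 0
    · exact Or.inr (h2 hq)
    · exact Or.inl hq
  have btrue : ∀ (x y : Nat), ((m.getD y []).getD x 0 < (m.getD x []).getD y 0) ∨
      ((m.getD x []).getD y 0 = (m.getD y []).getD x 0 ∧ gIdx.getD y 0 < gIdx.getD x 0) →
      b x y = true := by
    intro x y h1
    rw [hb x y]
    unfold pvE
    simp only [Bool.or_eq_true, Bool.and_eq_true, decide_eq_true_eq]
    exact h1
  rcases lt_trichotomy ((m.getD i []).getD j 0) ((m.getD j []).getD i 0) with h | h | h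
  · have b1 := bfalse i j (by omega) (by omega)
    have b2 := btrue j i (by omega)
    unfold pvInnerA
    rw [if_neg (by omega), if_pos h]
    simp [pvBStep, pvBump, b1, b2]
  · rcases lt_trichotomy (gIdx.getD i 0) (gIdx.getD j 0) with hg | hg | hg
    · have b1 := bfalse i j (by omega) (by omega)
      have b2 := btrue j i (by omega)
      unfold pvInnerA
      rw [if_neg (by omega), if_neg (by omega), if_neg (by omega), if_pos hg]
      simp [pvBStep, pvBump, b1, b2]
    · have b1 := bfalse i j (by omega) (by omega)
      have b2 := bfalse j i (by omega) (by omega)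
      unfold pvInnerA
      rw [if_neg (by omega), if_neg (by omega), if_neg (by omega), if_neg (by omega)]
      simp [pvBStep, b1, b2]
    · have b1 := btrue i j (by omega)
      have b2 := bfalse j i (by omega) (by omega)
      unfold pvInnerA
      rw [if_neg (by omega), if_neg (by omega), if_pos hg]
      simp [pvBStep, pvBump, b1, b2]
  · have b1 := btrue i j (by omega)
    have b2 := bfalse j i (by omega) (by omega)
    unfold pvInnerA
    rw [if_pos h]
    simp [pvBStep, pvBump, b1, b2]

theorem pv_inner_fold (n : Nat) (b : Nat → Nat → Bool) (i : Nat) (hi : i < n) :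
    ∀ (L : List Nat), (∀ j ∈ L, j < n) → L.Nodup → i ∉ L →
    ∀ (ans : List Int), ans.length = n →
    ((L.foldl (pvBStep b i) ans).length = n ∧
     ∀ k, k < n → (L.foldl (pvBStep b i) ans).getD k 0 =
        ans.getD k 0 + (if k = i then ((L.filter (fun j => b i j)).length : Int)
          else if k ∈ L then (if b k i then 1 else 0) else 0)) := by
  intro L
  induction L with
  | nil =>
    intro _ _ _ ans hans
    refine ⟨by simpa using hans, ?_⟩
    intro k hk
    simp
  | cons j0 t ih =>
    intro hL hnd hiL ans hans
    have hj0n : j0 < n := hL j0 List.mem_cons_self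
    have hij0 : i ≠ j0 := fun h => hiL (h ▸ List.mem_cons_self)
    set ans1 := pvBStep b i ans j0 with hans1def
    have hlen1 : ans1.length = n := by
      rw [hans1def]; unfold pvBStep
      split_ifs <;> simp [pv_bump_length, hans]
    have hv1 : ∀ k, k < n → ans1.getD k 0 = ans.getD k 0 +
        ((if k = i then (if b i j0 then 1 else 0) else 0) +
         (if k = j0 then (if b j0 i then 1 else 0) else 0) : Int) := by
      intro k hk
      rw [hans1def]; unfold pvBStep
      by_cases h1 : b i j0 = true <;> by_cases h2 : b j0 i = true
      · rw [if_pos h2, if_pos h1, pv_bump_getD _ _ (by rw [pv_bump_length]; omega),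
          pv_bump_getD _ _ (by omega)]
        simp only [h1, h2, if_true]
        split_ifs <;> omega
      · rw [if_neg h2, if_pos h1, pv_bump_getD _ _ (by omega)]
        simp only [h1, if_true, h2]
        split_ifs <;> simp_all <;> omega
      · rw [if_pos h2, if_neg h1, pv_bump_getD _ _ (by omega)]
        simp only [h2, if_true, h1]
        split_ifs <;> simp_all <;> omega
      · rw [if_neg h2, if_neg h1]
        simp only [h1, h2]
        split_ifs <;> simp_all <;> omega
    obtain ⟨ihlen, ihval⟩ := ih (fun j hj => hL j (List.mem_cons_of_mem _ hj))
      (List.Nodup.of_cons hnd) (fun h => hiL (List.mem_cons_of_mem _ h)) ans1 hlen1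
    refine ⟨by simpa using ihlen, ?_⟩
    intro k hk
    have hj0t : j0 ∉ t := (List.nodup_cons.1 hnd).1
    rw [List.foldl_cons, ihval k hk, hv1 k hk]
    by_cases hki : k = i
    · subst hki
      rw [List.filter_cons]
      by_cases hb0 : b k j0 = true
      · simp only [hb0, if_true, if_pos rfl, List.length_cons]
        push_cast
        omega
      · simp only [hb0, if_pos rfl, if_neg hij0, Bool.false_eq_true, ite_false, ite_true]
        omega
    · by_cases hkj0 : k = j0
      · subst hkj0
        simp only [if_neg hki, List.mem_cons, true_or, if_true, if_neg (by simpa using hj0t)]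
        split_ifs <;> omega
      · simp only [if_neg hki, if_neg hkj0, List.mem_cons]
        have : (k ∈ t ∨ k = j0) ↔ k ∈ t := by tauto
        by_cases hm : k ∈ t
        · simp [hm, hkj0]
        · simp [hm, hkj0]

theorem pv_outer_fold (n : Nat) (b : Nat → Nat → Bool) (hbii : ∀ i, b i i = false)
    (t : Nat) (ht : t ≤ n) :
    (((List.range t).foldl (fun ans i =>
        (List.range' (i + 1) (n - (i + 1))).foldl (pvBStep b i) ans)
        (List.replicate n 0)).length = n ∧
     ∀ k, k < n → ((List.range t).foldl (fun ans i =>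
        (List.range' (i + 1) (n - (i + 1))).foldl (pvBStep b i) ans)
        (List.replicate n 0)).getD k 0 =
        (if k < t then (((List.range n).filter (fun j => b k j)).length : Int)
         else (((List.range t).filter (fun i => b k i)).length : Int))) := by
  induction t with
  | zero =>
    refine ⟨by simp, ?_⟩
    intro k hk
    simp [List.getD_replicate, hk]
  | succ t iht =>
    have htn : t < n := by omega
    obtain ⟨plen, pval⟩ := iht (by omega)
    rw [List.range_succ, List.foldl_append, List.foldl_cons, List.foldl_nil]
    set P := (List.range t).foldl (fun ans i =>
        (List.range' (i + 1) (n - (i + 1))).foldl (pvBStep b i) ans) (List.replicate n 0) with hP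
    set L := List.range' (t + 1) (n - (t + 1)) with hL
    have hmemL : ∀ j, j ∈ L ↔ t + 1 ≤ j ∧ j < n := by
      intro j
      rw [hL, List.mem_range'_1]
      omega
    obtain ⟨flen, fval⟩ := pv_inner_fold n b t htn L
      (fun j hj => ((hmemL j).1 hj).2) (List.nodup_range' 1)
      (fun h => by have := (hmemL t).1 h; omega) P plen
    refine ⟨flen, ?_⟩
    intro k hk
    rw [fval k hk, pval k hk]
    have hsplit : List.range n = List.range (t + 1) ++ L := by
      rw [hL, List.range_eq_range', List.range_eq_range']
      have := @List.range'_append 0 (t + 1) (n - (t + 1)) 1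
      simp only [Nat.one_mul, Nat.zero_add] at this
      rw [this]
      congr 1
      omega
    by_cases hkt : k = t
    · subst hkt
      rw [if_neg (lt_irrefl k), if_pos (rfl : k = k), if_pos (Nat.lt_succ_self k), hsplit,
        List.filter_append, List.length_append, List.range_succ, List.filter_append,
        List.length_append]
      simp [hbii k]
    · by_cases hklt : k < t
      · have hnotL : k ∉ L := fun h => by have := (hmemL k).1 h; omega
        rw [if_pos hklt, if_neg hkt, if_neg hnotL, if_pos (show k < t + 1 by omega)]
        omega
      · have hmem : k ∈ L := (hmemL k).2 ⟨by omega, hk⟩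
        rw [if_neg hklt, if_neg hkt, if_pos hmem, if_neg (show ¬ k < t + 1 by omega)]
        by_cases hbk : b k t
        · simp [List.range_succ, hbk]
        · simp [List.range_succ, hbk]

-- ===== B-side lemmas =====

-- the first-occurrence rank fold, characterised by idxOf?

theorem pv_rankfold_get (s : List Int) : ∀ (k : Int) (d : PySem.Dict Int Int) (v : Int),
    (((PySem.List.enumerate s k).foldl
      (fun d p => if d.contains p.2 then d else d.insert p.2 p.1) d)).get? v =
    match d.get? v with
    | some x => some x
    | none => (s.idxOf? v).map (fun i => k + (i : Int)) := by
  induction s with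
  | nil => intro k d v; simp [PySem.List.enumerate]; cases d.get? v <;> simp
  | cons x t ih =>
    intro k d v
    rw [PySem.List.enumerate_cons, List.foldl_cons]
    simp only
    by_cases hc : d.contains x = true
    · rw [if_pos hc, ih]
      have hx : (d.get? x).isSome := by rw [← PySem.Dict.contains_eq_isSome_get?, hc]
      by_cases hv : x = v
      · subst hv
        cases hgx : d.get? x with
        | none => rw [hgx] at hx; simp at hx
        | some y => simp
      · rw [List.idxOf?_cons, if_neg (by simpa using hv)]
        cases d.get? v with
        | some y => simp
        | none =>
          simp only [Option.map_map]
          cases t.idxOf? v with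
          | none => simp
          | some i => simp; push_cast; ring
    · rw [if_neg hc, ih]
      have hx : d.get? x = none := by
        cases hgx : d.get? x with
        | none => rfl
        | some y =>
          exfalso; apply hc
          rw [PySem.Dict.contains_eq_isSome_get?, hgx]; rfl
      by_cases hv : x = v
      · subst hv
        rw [PySem.Dict.get?_insert, if_pos rfl, hx, List.idxOf?_cons, if_pos (by simp)]
        simp
      · rw [PySem.Dict.get?_insert, if_neg (fun h => hv h.symm), List.idxOf?_cons,
          if_neg (by simpa using hv)]
        cases d.get? v with
        | some y => simp
        | none =>
          simp only [Option.map_map]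
          cases t.idxOf? v with
          | none => simp
          | some i => simp; push_cast; ring

-- first index of v in a ≤-sorted list = number of elements < v
theorem pv_idx_count (s : List Int) (hs : s.Pairwise (· ≤ ·)) (v : Int) (i : Nat)
    (h : s.idxOf? v = some i) : s.countP (fun x => decide (x < v)) = i := by
  rw [List.idxOf?_eq_some_iff] at h
  obtain ⟨hi, hv, hfirst⟩ := h
  have hpw := List.pairwise_iff_getElem.1 hs
  have hsplit : s = s.take i ++ s.drop i := (List.take_append_drop i s).symm
  rw [hsplit, List.countP_append] at *
  have h1 : (s.take i).countP (fun x => decide (x < v)) = i := by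
    rw [List.countP_eq_length_filter, List.filter_eq_self.2, List.length_take]
    · omega
    · intro x hx
      rw [List.mem_take_iff_getElem] at hx
      obtain ⟨j, hj, rfl⟩ := hx
      have hjlt : j < i := by omega
      have := hpw j i (by omega) hi hjlt
      have hne := hfirst j hjlt
      simp only [decide_eq_true_eq]
      omega
  have h2 : (s.drop i).countP (fun x => decide (x < v)) = 0 := by
    rw [List.countP_eq_zero]
    intro x hx
    rw [List.mem_drop_iff_getElem] at hx
    obtain ⟨j, hj, rfl⟩ := hx
    have : s[i] ≤ s[i + j] := by
      rcases Nat.eq_zero_or_pos j with rfl | hjpos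
      · simp
      · exact hpw i (i + j) hi (by omega) (by omega)
    simp only [decide_eq_true_eq]
    omega
  omega

-- rank[v] for v ∈ net
theorem pv_rank_getD (net : List Int) (v : Int) (hv : v ∈ net) :
    (pvRank net).getD v 0 = (net.countP (fun x => decide (x < v)) : Int) := by
  unfold pvRank PySem.Dict.getD
  rw [pv_rankfold_get]
  have hperm := PySem.List.sorted_perm net (fun x => x) false
  have hvs : v ∈ PySem.List.sorted net (fun x => x) false :=
    (PySem.List.mem_sorted net (fun x => x) false v).2 hv
  have hcnt : (PySem.List.sorted net (fun x => x) false).countP (fun x => decide (x < v)) =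
      net.countP (fun x => decide (x < v)) := hperm.countP_eq _
  rw [PySem.Dict.get?_empty]
  obtain ⟨i, h⟩ : ∃ i, (PySem.List.sorted net (fun x => x) false).idxOf? v = some i := by
    cases hx : (PySem.List.sorted net (fun x => x) false).idxOf? v with
    | none => rw [List.idxOf?_eq_none_iff] at hx; exact absurd hvs hx
    | some i => exact ⟨i, rfl⟩
  rw [h]
  have hcount := pv_idx_count (PySem.List.sorted net (fun x => x) false)
    (PySem.List.sorted_pairwise net (fun x => x)) v i h
  show (Option.map (fun j : Nat => (0 : Int) + (j : Int)) (some i)).getD 0 = _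
  simp only [Option.map_some, Option.getD_some]
  omega

-- pointwise effect of B's correction fold
theorem pv_corr_fold (cnt : PySem.Dict (Int × Int) Int) (net : List Int) (n : Nat)
    (L : List ((Int × Int) × Int)) :
    ∀ (sc : List Int), sc.length = n →
    (∀ p ∈ L, 0 ≤ p.1.1 ∧ p.1.1 < (n : Int) ∧ 0 ≤ p.1.2 ∧ p.1.2 < (n : Int)) →
    ((L.foldl (pvQualStep cnt net) sc).length = n ∧
     ∀ i, i < n → (L.foldl (pvQualStep cnt net) sc).getD i 0 =
        sc.getD i 0 + (L.map (pvContrib cnt net i)).sum) := by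
  induction L with
  | nil => intro sc hsc _; exact ⟨hsc, by simp⟩
  | cons p t ih =>
    intro sc hsc hL
    obtain ⟨⟨a, b⟩, c⟩ := p
    obtain ⟨ha0, haN, hb0, hbN⟩ := hL ((a, b), c) List.mem_cons_self
    dsimp only at ha0 haN hb0 hbN
    have hlen1 : (pvQualStep cnt net sc ((a, b), c)).length = n := by
      unfold pvQualStep
      split_ifs <;> simp [List.length_set, hsc]
    have hv1 : ∀ i, i < n → (pvQualStep cnt net sc ((a, b), c)).getD i 0 =
        sc.getD i 0 + pvContrib cnt net i ((a, b), c) := by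
      intro i hi
      unfold pvQualStep pvContrib pvB
      dsimp only
      by_cases hq : a ≠ b ∧ cnt.getD (b, a) 0 < c
      · rw [if_pos hq, if_pos hq]
        have hab := hq.1
        by_cases hiB : i = b.toNat
        · subst hiB
          rw [pv_getD_set, if_pos ⟨rfl, by rw [List.length_set]; omega⟩,
            pv_getD_set, if_neg (fun hh => by omega),
            if_neg (show ¬ a = ((b.toNat : Nat) : Int) by omega),
            if_pos (show b = ((b.toNat : Nat) : Int) by omega)]
          split_ifs <;> omega
        · by_cases hiA : i = a.toNat
          · subst hiA
            rw [pv_getD_set, if_neg (fun hh => by omega),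
              pv_getD_set, if_pos ⟨rfl, by omega⟩,
              if_pos (show a = ((a.toNat : Nat) : Int) by omega),
              if_neg (show ¬ b = ((a.toNat : Nat) : Int) by omega)]
            split_ifs <;> omega
          · rw [pv_getD_set, if_neg (fun hh => hiB hh.1),
              pv_getD_set, if_neg (fun hh => hiA hh.1),
              if_neg (show ¬ a = (i : Int) by omega),
              if_neg (show ¬ b = (i : Int) by omega)]
            omega
      · rw [if_neg hq, if_neg hq]
        omega
    obtain ⟨ihlen, ihval⟩ := ih (pvQualStep cnt net sc ((a, b), c)) hlen1
      (fun q hq => hL q (List.mem_cons_of_mem _ hq))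
    refine ⟨ihlen, ?_⟩
    intro i hi
    rw [List.foldl_cons, ihval i hi, hv1 i hi, List.map_cons, List.sum_cons]
    ring


theorem pv_items_sum (cnt : PySem.Dict (Int × Int) Int) (net : List Int) (n i : Nat)
    (hi : i < n) (hnd : cnt.keys.Nodup)
    (hrange : ∀ p ∈ cnt.items, 0 ≤ p.1.1 ∧ p.1.1 < (n : Int) ∧ 0 ≤ p.1.2 ∧ p.1.2 < (n : Int))
    (hpos : ∀ k, 0 ≤ cnt.getD k 0) :
    ((cnt.items).map (pvContrib cnt net i)).sum = ∑ j ∈ Finset.range n, pvDelta cnt net i j := by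
  have hkeys : ∀ k ∈ cnt.keys, 0 ≤ k.1 ∧ k.1 < (n : Int) ∧ 0 ≤ k.2 ∧ k.2 < (n : Int) := by
    intro k hk
    simp only [PySem.Dict.keys] at hk
    obtain ⟨p, hp, rfl⟩ := List.mem_map.1 hk
    exact hrange p hp
  set G : Int × Int → Int := fun k => pvContrib cnt net i (k, cnt.getD k 0) with hG
  have hmapeq : (cnt.items).map (pvContrib cnt net i) = (cnt.items).map (fun p => G p.1) := by
    apply List.map_congr_left
    intro p hp
    have hgd : cnt.getD p.1 0 = p.2 :=
      PySem.Dict.getD_of_mem_items cnt (by rw [Prod.mk.eta]; exact hp) hnd 0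
    rw [hG]
    dsimp only
    rw [hgd, Prod.mk.eta]
  have hkeysum : ((cnt.items).map (fun p => G p.1)).sum = ((cnt.keys).map G).sum := by
    simp only [PySem.Dict.keys, List.map_map]
    rfl
  rw [hmapeq, hkeysum, ← List.sum_toFinset G hnd]
  set K := cnt.keys.toFinset with hK
  have hgd0 : ∀ (u v : Int), ((u, v) ∉ K) → cnt.getD (u, v) 0 = 0 := by
    intro u v hmem
    have hnone : cnt.get? (u, v) = none :=
      (PySem.Dict.get?_eq_none_iff_not_mem_keys cnt (u, v)).2
        (fun h => hmem (List.mem_toFinset.2 h))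
    simp [PySem.Dict.getD, hnone]
  set G1 : Int × Int → Int := fun k =>
    if k.1 = (i : Int) ∧ (k.1 ≠ k.2 ∧ cnt.getD (k.2, k.1) 0 < cnt.getD k 0)
    then 1 - pvB net i k.2.toNat else 0 with hG1
  set G2 : Int × Int → Int := fun k =>
    if k.2 = (i : Int) ∧ (k.1 ≠ k.2 ∧ cnt.getD (k.2, k.1) 0 < cnt.getD k 0)
    then -(pvB net i k.1.toNat) else 0 with hG2
  have hGsplit : ∀ k, G k = G1 k + G2 k := by
    intro k
    rw [hG, hG1, hG2]
    unfold pvContrib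
    dsimp only
    by_cases hq : k.1 ≠ k.2 ∧ cnt.getD (k.2, k.1) 0 < cnt.getD k 0
    · rw [if_pos hq]
      by_cases h1 : k.1 = (i : Int)
      · rw [if_pos h1, if_pos (⟨h1, hq⟩ : k.1 = (i : Int) ∧ (k.1 ≠ k.2 ∧ cnt.getD (k.2, k.1) 0 < cnt.getD k 0))]
        by_cases h2 : k.2 = (i : Int)
        · rw [if_pos h2, if_pos (⟨h2, hq⟩ : k.2 = (i : Int) ∧ (k.1 ≠ k.2 ∧ cnt.getD (k.2, k.1) 0 < cnt.getD k 0))]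
        · rw [if_neg h2,
            if_neg (fun (hh : k.2 = (i : Int) ∧ (k.1 ≠ k.2 ∧ cnt.getD (k.2, k.1) 0 < cnt.getD k 0)) => h2 hh.1)]
      · rw [if_neg h1,
          if_neg (fun (hh : k.1 = (i : Int) ∧ (k.1 ≠ k.2 ∧ cnt.getD (k.2, k.1) 0 < cnt.getD k 0)) => h1 hh.1)]
        by_cases h2 : k.2 = (i : Int)
        · rw [if_pos h2, if_pos (⟨h2, hq⟩ : k.2 = (i : Int) ∧ (k.1 ≠ k.2 ∧ cnt.getD (k.2, k.1) 0 < cnt.getD k 0))]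
        · rw [if_neg h2,
            if_neg (fun (hh : k.2 = (i : Int) ∧ (k.1 ≠ k.2 ∧ cnt.getD (k.2, k.1) 0 < cnt.getD k 0)) => h2 hh.1)]
    · rw [if_neg hq,
        if_neg (fun (hh : k.1 = (i : Int) ∧ (k.1 ≠ k.2 ∧ cnt.getD (k.2, k.1) 0 < cnt.getD k 0)) => hq hh.2),
        if_neg (fun (hh : k.2 = (i : Int) ∧ (k.1 ≠ k.2 ∧ cnt.getD (k.2, k.1) 0 < cnt.getD k 0)) => hq hh.2)]
      ring
  rw [Finset.sum_congr rfl (fun k _ => hGsplit k), Finset.sum_add_distrib]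
  have hhalf1 : (∑ k ∈ K, G1 k) = ∑ j ∈ Finset.range n,
      (if cnt.getD ((j : Int), (i : Int)) 0 < cnt.getD ((i : Int), (j : Int)) 0
       then 1 - pvB net i j else 0) := by
    have hvanish : ∀ k ∈ K, G1 k ≠ 0 → k.1 = (i : Int) := by
      intro k _ hne
      by_contra hk1
      exact hne (by rw [hG1]; exact if_neg (fun hh => hk1 hh.1))
    rw [← Finset.sum_filter_of_ne hvanish]
    have himg : K.filter (fun k => k.1 = (i : Int)) =
        Finset.image (fun j : Nat => ((i : Int), (j : Int)))
          ((Finset.range n).filter (fun j : Nat => ((i : Int), (j : Int)) ∈ K)) := by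
      apply Finset.ext
      intro k
      simp only [Finset.mem_filter, Finset.mem_image, Finset.mem_range]
      constructor
      · rintro ⟨hkK, hk1⟩
        have hb := hkeys k (List.mem_toFinset.1 hkK)
        have h2 : ((k.2.toNat : Nat) : Int) = k.2 := by omega
        have heq : ((i : Int), ((k.2.toNat : Nat) : Int)) = k := by
          rw [h2, ← hk1, Prod.mk.eta]
        exact ⟨k.2.toNat, ⟨by omega, by rw [heq]; exact hkK⟩, heq⟩
      · rintro ⟨j, ⟨hj, hjK⟩, rfl⟩
        exact ⟨hjK, rfl⟩
    have hinj : Set.InjOn (fun j : Nat => ((i : Int), (j : Int)))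
        ↑((Finset.range n).filter (fun j : Nat => ((i : Int), (j : Int)) ∈ K)) := by
      intro j1 _ j2 _ h
      have := congrArg Prod.snd h
      simpa using this
    rw [himg, Finset.sum_image hinj, Finset.sum_filter]
    apply Finset.sum_congr rfl
    intro j hj
    rw [Finset.mem_range] at hj
    by_cases hmem : ((i : Int), (j : Int)) ∈ K
    · rw [if_pos hmem, hG1]
      dsimp only
      by_cases hij : i = j
      · subst hij
        rw [if_neg (fun hh => hh.2.1 rfl), if_neg (lt_irrefl _)]
      · by_cases hlt : cnt.getD ((j : Int), (i : Int)) 0 < cnt.getD ((i : Int), (j : Int)) 0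
        · rw [if_pos ⟨rfl, (by omega : ((i : Nat) : Int) ≠ ((j : Nat) : Int)), hlt⟩, if_pos hlt,
            Int.toNat_natCast]
        · rw [if_neg (fun hh => hlt hh.2.2), if_neg hlt]
    · have h0 := hgd0 (i : Int) (j : Int) hmem
      have h1 := hpos ((j : Int), (i : Int))
      rw [if_neg hmem, if_neg (show ¬ cnt.getD ((j : Int), (i : Int)) 0 <
        cnt.getD ((i : Int), (j : Int)) 0 by omega)]
  have hhalf2 : (∑ k ∈ K, G2 k) = ∑ j ∈ Finset.range n,
      (if cnt.getD ((i : Int), (j : Int)) 0 < cnt.getD ((j : Int), (i : Int)) 0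
       then -(pvB net i j) else 0) := by
    have hvanish : ∀ k ∈ K, G2 k ≠ 0 → k.2 = (i : Int) := by
      intro k _ hne
      by_contra hk2
      exact hne (by rw [hG2]; exact if_neg (fun hh => hk2 hh.1))
    rw [← Finset.sum_filter_of_ne hvanish]
    have himg : K.filter (fun k => k.2 = (i : Int)) =
        Finset.image (fun j : Nat => ((j : Int), (i : Int)))
          ((Finset.range n).filter (fun j : Nat => ((j : Int), (i : Int)) ∈ K)) := by
      apply Finset.ext
      intro k
      simp only [Finset.mem_filter, Finset.mem_image, Finset.mem_range]
      constructor
      · rintro ⟨hkK, hk2⟩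
        have hb := hkeys k (List.mem_toFinset.1 hkK)
        have h1 : ((k.1.toNat : Nat) : Int) = k.1 := by omega
        have heq : (((k.1.toNat : Nat) : Int), (i : Int)) = k := by
          rw [h1, ← hk2, Prod.mk.eta]
        exact ⟨k.1.toNat, ⟨by omega, by rw [heq]; exact hkK⟩, heq⟩
      · rintro ⟨j, ⟨hj, hjK⟩, rfl⟩
        exact ⟨hjK, rfl⟩
    have hinj : Set.InjOn (fun j : Nat => ((j : Int), (i : Int)))
        ↑((Finset.range n).filter (fun j : Nat => ((j : Int), (i : Int)) ∈ K)) := by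
      intro j1 _ j2 _ h
      have := congrArg Prod.fst h
      simpa using this
    rw [himg, Finset.sum_image hinj, Finset.sum_filter]
    apply Finset.sum_congr rfl
    intro j hj
    rw [Finset.mem_range] at hj
    by_cases hmem : ((j : Int), (i : Int)) ∈ K
    · rw [if_pos hmem, hG2]
      dsimp only
      by_cases hij : i = j
      · subst hij
        rw [if_neg (fun hh => hh.2.1 rfl), if_neg (lt_irrefl _)]
      · by_cases hlt : cnt.getD ((i : Int), (j : Int)) 0 < cnt.getD ((j : Int), (i : Int)) 0
        · rw [if_pos ⟨rfl, (by omega : ((j : Nat) : Int) ≠ ((i : Nat) : Int)), hlt⟩, if_pos hlt,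
            Int.toNat_natCast]
        · rw [if_neg (fun hh => hlt hh.2.2), if_neg hlt]
    · have h0 := hgd0 (j : Int) (i : Int) hmem
      have h1 := hpos ((i : Int), (j : Int))
      rw [if_neg hmem, if_neg (show ¬ cnt.getD ((i : Int), (j : Int)) 0 <
        cnt.getD ((j : Int), (i : Int)) 0 by omega)]
  rw [hhalf1, hhalf2, ← Finset.sum_add_distrib]
  apply Finset.sum_congr rfl
  intro j _
  rfl


theorem pv_sum_indicator (n : Nat) (p : Nat → Bool) :
    (∑ j ∈ Finset.range n, (if p j then (1 : Int) else 0)) = ((List.range n).countP p : Int) := by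
  induction n with
  | zero => simp
  | succ m ih =>
    rw [Finset.sum_range_succ, ih, List.range_succ, List.countP_append]
    by_cases h : p m <;> simp [h, List.countP_cons]

theorem pv_countP_range (net : List Int) (p : Int → Bool) :
    net.countP p = (List.range net.length).countP (fun j => p (net.getD j 0)) := by
  have hnet : net = (List.range net.length).map (fun j => net.getD j 0) := by
    apply List.ext_getElem
    · simp
    · intro i h1 h2
      simp only [List.getElem_map, List.getElem_range]
      rw [List.getD_eq_getElem _ _ h1]
  conv_lhs => rw [hnet]
  rw [List.countP_map]
  rfl

theorem pv_getD_mem (net : List Int) (i : Nat) (hi : i < net.length) :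
    net.getD i 0 ∈ net := by
  rw [List.getD_eq_getElem _ _ hi]
  exact List.getElem_mem hi

-- ===== VERDICT =====
theorem solution_spec : Claim_equal_solution := by
  intro friends gifts _hdom hpre
  obtain ⟨hne, -⟩ := hpre
  have h0 : 0 < friends.length := List.length_pos_of_ne_nil hne
  unfold Spec_solution solution solution_alt
  dsimp only
  set n := friends.length with hn
  set nmap := pvNmap friends with hnmap
  have hnm := pv_nmap_bound friends hne
  have hR0 : pvR n (List.replicate n (List.replicate n 0)) PySem.Dict.empty
      (List.replicate n 0) := by
    refine ⟨by simp, ?_, by simp, ?_, ?_, ?_, ?_, ?_⟩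
    · intro i hi; simp [List.getD_replicate, hi]
    · intro i j hi hj
      simp [pvE, List.getD_replicate, hi, hj, PySem.Dict.getD_empty]
    · intro i hi
      have hz : ∀ i' j' : Nat, i' < n → j' < n →
          pvE (List.replicate n (List.replicate n (0 : Int))) i' j' = 0 := by
        intro i' j' hi' hj'
        simp [pvE, List.getD_replicate, hi', hj']
      rw [Finset.sum_congr rfl (fun j hj => hz i j hi (Finset.mem_range.1 hj)),
        Finset.sum_congr rfl (fun j hj => hz j i (Finset.mem_range.1 hj) hi)]
      simp [List.getD_replicate, hi]
    · exact PySem.Dict.nodup_keys_empty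
    · intro p hp
      simp [PySem.Dict.empty, PySem.Dict.items] at hp
    · intro k
      simp [PySem.Dict.getD_empty]
  have hRf := pv_fold_inv n nmap hnm gifts _ _ _ hR0
  set M := gifts.foldl (pvStepA nmap) (List.replicate n (List.replicate n 0)) with hM
  set ST := gifts.foldl (pvStepB nmap) (PySem.Dict.empty, List.replicate n 0) with hST
  obtain ⟨hMlen, hMrow, hNlen, hC, hN, hnd, hitems, hposv⟩ := hRf
  set gIdx : List Int := (List.range n).map (fun i =>
    (M.getD i []).sum - (List.range n).foldl (fun t j => t + (M.getD j []).getD i 0) 0)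
    with hgIdxdef
  have hgIdx : ∀ i, i < n → gIdx.getD i 0 = ST.2.getD i 0 := by
    intro i hi
    rw [hgIdxdef, PySem.List.getD_map_range _ _ _ _ hi, hN i hi,
      pv_sum_getD (M.getD i []), hMrow i hi, pv_foldl_range_add]
    rfl
  -- the canonical boolean
  set bf : Nat → Nat → Bool := fun i j => (decide (pvE M j i < pvE M i j) ||
    (decide (pvE M i j = pvE M j i) && decide (gIdx.getD j 0 < gIdx.getD i 0))) with hbf
  have hbii : ∀ i, bf i i = false := by intro i; simp [hbf]
  -- A's pair loop in canonical form
  have hloop : (List.range n).foldl (fun ans i =>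
      (List.range' (i + 1) (n - (i + 1))).foldl (pvInnerA M gIdx i) ans)
      (List.replicate n 0) =
    (List.range n).foldl (fun ans i =>
      (List.range' (i + 1) (n - (i + 1))).foldl (pvBStep bf i) ans)
      (List.replicate n 0) := by
    apply PySem.List.foldl_congr_mem
    intro acc i _
    apply PySem.List.foldl_congr_mem
    intro a j _
    exact pv_innerA_bump M gIdx bf (fun _ _ => rfl) i j a
  obtain ⟨flen, fval⟩ := pv_outer_fold n bf hbii n le_rfl
  -- B's final score list
  set rank := pvRank ST.2 with hrank
  set score0 : List Int := ST.2.map (fun v => rank.getD v 0) with hscore0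
  have hs0len : score0.length = n := by rw [hscore0, List.length_map, hNlen]
  have hs0 : ∀ i, i < n → score0.getD i 0 =
      ((ST.2.countP (fun x => decide (x < ST.2.getD i 0))) : Int) := by
    intro i hi
    have hilen : i < ST.2.length := by omega
    have e1 : score0.getD i 0 = rank.getD (ST.2.getD i 0) 0 := by
      rw [hscore0, List.getD_eq_getElem _ _ (by simpa using hilen), List.getElem_map,
        List.getD_eq_getElem _ _ hilen]
    rw [e1, hrank, pv_rank_getD ST.2 _ (pv_getD_mem ST.2 i hilen)]
  obtain ⟨hclen, hcval⟩ := pv_corr_fold ST.1 ST.2 n ST.1.items score0 hs0len hitems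
  -- pointwise bridge: indicator of bf = pvB + pvDelta
  have hbridge : ∀ i j, i < n → j < n →
      (if bf i j then (1 : Int) else 0) = pvB ST.2 i j + pvDelta ST.1 ST.2 i j := by
    intro i j hi hj
    rw [hbf]
    simp only [Bool.or_eq_true, Bool.and_eq_true, decide_eq_true_eq]
    unfold pvDelta pvB
    rw [← hC i j hi hj, ← hC j i hj hi, ← hgIdx i hi, ← hgIdx j hj]
    split_ifs <;> omega
  -- per-index equality of the two final lists
  have hpoint : ∀ i, i < n →
      (ST.1.items.foldl (pvQualStep ST.1 ST.2) score0).getD i 0 =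
      (((List.range n).filter (fun j => bf i j)).length : Int) := by
    intro i hi
    rw [hcval i hi, hs0 i hi, pv_items_sum ST.1 ST.2 n i hi hnd hitems hposv]
    have h1 : ((ST.2.countP (fun x => decide (x < ST.2.getD i 0))) : Int) =
        ∑ j ∈ Finset.range n, pvB ST.2 i j := by
      rw [pv_countP_range ST.2 _, hNlen]
      rw [← pv_sum_indicator n (fun j => decide (ST.2.getD j 0 < ST.2.getD i 0))]
      apply Finset.sum_congr rfl
      intro j _
      unfold pvB
      by_cases h : ST.2.getD j 0 < ST.2.getD i 0 <;> simp [h]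
    have h2 : (((List.range n).filter (fun j => bf i j)).length : Int) =
        ∑ j ∈ Finset.range n, (if bf i j then (1 : Int) else 0) := by
      rw [pv_sum_indicator n (fun j => bf i j), List.countP_eq_length_filter]
    rw [h1, h2, Finset.sum_congr rfl
      (fun j hj => hbridge i j hi (Finset.mem_range.1 hj)), Finset.sum_add_distrib]
  -- the two final lists are equal
  have hlists : (List.range n).foldl (fun ans i =>
      (List.range' (i + 1) (n - (i + 1))).foldl (pvInnerA M gIdx i) ans)
      (List.replicate n 0) =
      ST.1.items.foldl (pvQualStep ST.1 ST.2) score0 := by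
    rw [hloop]
    apply List.ext_getElem
    · rw [flen, hclen]
    · intro k h1 h2
      have hk : k < n := by rw [flen] at h1; exact h1
      have hA := fval k hk
      have hB := hpoint k hk
      rw [List.getD_eq_getElem _ _ h1] at hA
      rw [List.getD_eq_getElem _ _ h2] at hB
      rw [hA, hB, if_pos hk]
  rw [hlists]
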